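-- pv_equiv track=rewrite | github.com/posl/comment_recommendation | script/mod_gen/5_time/zh/272_C/9.py | findEvenSum
-- ===== SOURCE A (Python) =====
-- def findEvenSum(list):
--     evenSum = -1
--     for i in range(len(list)):
--         for j in range(i+1,len(list)):
--             if (list[i]+list[j])%2==0:
--                 if evenSum<list[i]+list[j]:
--                     evenSum = list[i]+list[j]
--     return evenSum
-- ===== SOURCE B (Python) =====
-- def _push_top2(t1, t2, x):
--     # maintain the two largest values seen so far (t1 >= t2)
--     if t1 is None or x > t1:
--         return x, t1
--     if t2 is None or x > t2:
--         return t1, x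
--     return t1, t2
--
--
-- def findEvenSum(list):
--     # One pass: a pair sum is even iff both elements have the same parity,
--     # so the best even pair sum is max(top-two evens sum, top-two odds sum).
--     e1 = e2 = o1 = o2 = None
--     for x in list:
--         if x % 2 == 0:
--             e1, e2 = _push_top2(e1, e2, x)
--         else:
--             o1, o2 = _push_top2(o1, o2, x)
--     best = -1
--     if e2 is not None:
--         best = max(best, e1 + e2)
--     if o2 is not None:
--         best = max(best, o1 + o2)
--     return best
-- ===== Notes on version B (the rewrite author's own statement) =====
-- stated objective: faster
-- what changed: Replaced the O(n^2) all-pairs scan by a single pass that tracks the two largest evens and two largest odds (a pair sum is even iff both elements share parity), then takes the best of the two class sums.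
import Mathlib
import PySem

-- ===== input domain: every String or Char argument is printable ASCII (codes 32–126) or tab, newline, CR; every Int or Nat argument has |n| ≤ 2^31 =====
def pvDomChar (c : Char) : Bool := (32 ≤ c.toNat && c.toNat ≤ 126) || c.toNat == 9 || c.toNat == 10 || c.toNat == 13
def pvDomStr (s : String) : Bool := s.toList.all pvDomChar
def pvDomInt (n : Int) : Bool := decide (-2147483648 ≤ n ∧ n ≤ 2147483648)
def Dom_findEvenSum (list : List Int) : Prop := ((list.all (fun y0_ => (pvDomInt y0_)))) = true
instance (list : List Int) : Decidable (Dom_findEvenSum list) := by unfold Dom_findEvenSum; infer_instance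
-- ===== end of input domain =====

-- B replaces A's O(n^2) all-pairs scan by one pass tracking the two largest evens
-- and two largest odds (a pair sum is even iff both elements share parity).


-- ===== PORT A =====
def findEvenSum (list : List Int) : Int :=
  (PySem.List.pyRange 0 (list.length : Int) 1).foldl (fun evenSum i =>
    (PySem.List.pyRange (i + 1) (list.length : Int) 1).foldl (fun evenSum j =>
      if PySem.Int.mod (PySem.List.pyGetD list i 0 + PySem.List.pyGetD list j 0) 2 == 0 then
        if evenSum < PySem.List.pyGetD list i 0 + PySem.List.pyGetD list j 0 then
          PySem.List.pyGetD list i 0 + PySem.List.pyGetD list j 0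
        else evenSum
      else evenSum) evenSum) (-1)

-- ===== PORT B =====
-- maintain the two largest values seen so far (t1 >= t2); `none` = Python None
def pushTop2 (t1 t2 : Option Int) (x : Int) : Option Int × Option Int :=
  if (match t1 with | none => true | some a => decide (x > a)) then (some x, t1)
  else if (match t2 with | none => true | some b => decide (x > b)) then (t1, some x)
  else (t1, t2)

def findEvenSum_alt (list : List Int) : Int :=
  let s := list.foldl (fun s x =>
      if PySem.Int.mod x 2 == 0 then (pushTop2 s.1.1 s.1.2 x, s.2)
      else (s.1, pushTop2 s.2.1 s.2.2 x))
      ((none, none), (none, none))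
  let best : Int := -1
  let best := match s.1.2 with
    | some e2 => max best (s.1.1.getD 0 + e2)
    | none => best
  let best := match s.2.2 with
    | some o2 => max best (s.2.1.getD 0 + o2)
    | none => best
  best

-- ===== PRECONDITION & SPEC =====
def Spec_findEvenSum (list : List Int) (out : Int) : Prop := out = findEvenSum_alt list
instance (list : List Int) (out : Int) : Decidable (Spec_findEvenSum list out) := by unfold Spec_findEvenSum; infer_instance

-- ===== CLAIM (what is proved, stated in full; the proofs are below) =====
def Claim_equal_findEvenSum : Prop := ∀ (list : List Int), Dom_findEvenSum list → Spec_findEvenSum list (findEvenSum list)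

-- ===== LEMMAS AND PROOFS =====

-- max of two optional values
def omax : Option Int → Option Int → Option Int
  | none, o => o
  | some a, none => some a
  | some a, some b => some (max a b)

-- fold an optional candidate into an Int accumulator
def clampF (b : Int) : Option Int → Int
  | none => b
  | some s => max b s

-- maximum element of a list, as an Option
def maxO (l : List Int) : Option Int := l.foldl (fun m x => omax m (some x)) none

-- maximum sum over pairs of two distinct positions
def top2sum : List Int → Option Int
  | [] => none
  | x :: xs => omax ((maxO xs).map (fun m => x + m)) (top2sum xs)

def pEven (y : Int) : Bool := PySem.Int.mod y 2 == 0

-- A's inner-loop step, structurally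
def pstep (x : Int) (b y : Int) : Int :=
  if pEven (x + y) then (if b < x + y then x + y else b) else b

-- A's nested loops, structurally over the list
def pairsFoldAux : List Int → Int → Int
  | [], b => b
  | x :: xs, b => pairsFoldAux xs (xs.foldl (pstep x) b)

def specVal (l : List Int) : Option Int :=
  omax (top2sum (l.filter pEven)) (top2sum (l.filter (fun y => !pEven y)))

def top2 (l : List Int) : Option Int × Option Int :=
  l.foldl (fun s x => pushTop2 s.1 s.2 x) (none, none)

theorem pEven_mod (y : Int) : pEven y = decide (y % 2 = 0) := by
  rw [pEven, PySem.Int.mod_eq_emod_of_pos (show (0:Int) < 2 by norm_num)]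
  by_cases h : y % 2 = 0 <;> simp [h]

theorem omax_none_right (a : Option Int) : omax a none = a := by cases a <;> rfl

theorem omax_comm (a b : Option Int) : omax a b = omax b a := by
  cases a <;> cases b <;> simp [omax, max_comm]

theorem omax_assoc (a b c : Option Int) : omax (omax a b) c = omax a (omax b c) := by
  cases a <;> cases b <;> cases c <;> simp [omax, max_assoc]

theorem omax_left_comm (a b c : Option Int) : omax a (omax b c) = omax b (omax a c) := by
  rw [← omax_assoc, omax_comm a b, omax_assoc]

theorem clampF_omax (b : Int) (o1 o2 : Option Int) :
    clampF (clampF b o1) o2 = clampF b (omax o1 o2) := by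
  cases o1 <;> cases o2 <;> simp [clampF, omax, max_assoc]

theorem omax_map_add (x : Int) (a b : Option Int) :
    (omax a b).map (fun m => x + m) = omax (a.map (fun m => x + m)) (b.map (fun m => x + m)) := by
  cases a <;> cases b <;> simp [omax]

theorem maxO_go (l : List Int) : ∀ m : Option Int,
    l.foldl (fun m x => omax m (some x)) m = omax m (maxO l) := by
  induction l with
  | nil => intro m; simp [List.foldl, maxO, omax_none_right]
  | cons x xs ih =>
      intro m
      simp only [List.foldl, maxO]
      rw [ih (omax m (some x)), ih (omax none (some x)), omax_assoc]
      rfl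

theorem maxO_cons (x : Int) (l : List Int) : maxO (x :: l) = omax (some x) (maxO l) := by
  simp only [maxO, List.foldl]
  rw [maxO_go]
  try rfl

theorem maxO_append (l : List Int) (x : Int) : maxO (l ++ [x]) = omax (maxO l) (some x) := by
  simp only [maxO, List.foldl_append, List.foldl]
  try rw [maxO_go]
  try rfl

theorem maxO_eq_none (l : List Int) : maxO l = none ↔ l = [] := by
  cases l with
  | nil => simp [maxO]
  | cons x xs =>
      rw [maxO_cons]
      cases maxO xs <;> simp [omax]

theorem top2sum_append (l : List Int) (x : Int) :
    top2sum (l ++ [x]) = omax ((maxO l).map (fun m => m + x)) (top2sum l) := by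
  induction l with
  | nil => simp [top2sum, maxO, omax]
  | cons y t ih =>
      show top2sum (y :: (t ++ [x])) = _
      rw [top2sum, ih, maxO_append, maxO_cons, top2sum]
      cases ht : maxO t <;> cases hs : top2sum t <;>
        simp [omax] <;> omega

-- A's inner loop computes: clamp in the best "x + same-parity element" candidate
theorem inner_char (x : Int) (xs : List Int) : ∀ b : Int,
    xs.foldl (pstep x) b
      = clampF b ((maxO (xs.filter (fun y => pEven (x + y)))).map (fun m => x + m)) := by
  induction xs with
  | nil => intro b; simp [maxO, clampF]
  | cons y t ih =>
      intro b
      by_cases h : pEven (x + y)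
      · have hfil : (y :: t).filter (fun y => pEven (x + y))
            = y :: t.filter (fun y => pEven (x + y)) := by simp [List.filter, h]
        have hstep : pstep x b y = max b (x + y) := by
          simp only [pstep, if_pos h]
          split_ifs <;> omega
        calc (y :: t).foldl (pstep x) b = t.foldl (pstep x) (pstep x b y) := rfl
          _ = clampF (max b (x + y)) ((maxO (t.filter (fun y => pEven (x + y)))).map (fun m => x + m)) := by
              rw [hstep, ih]
          _ = _ := by
              rw [hfil, maxO_cons, omax_map_add, ← clampF_omax]
              simp [clampF]
      · have hfil : (y :: t).filter (fun y => pEven (x + y))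
            = t.filter (fun y => pEven (x + y)) := by simp [List.filter, h]
        have hstep : pstep x b y = b := by simp [pstep, h]
        calc (y :: t).foldl (pstep x) b = t.foldl (pstep x) (pstep x b y) := rfl
          _ = _ := by rw [hstep, ih, hfil]

theorem filter_parity_even (x : Int) (hx : pEven x = true) (t : List Int) :
    t.filter (fun y => pEven (x + y)) = t.filter pEven := by
  apply List.filter_congr
  intro y _
  rw [pEven_mod] at hx
  rw [decide_eq_true_eq] at hx
  rw [pEven_mod, pEven_mod, decide_eq_decide]
  constructor <;> intro <;> omega

theorem filter_parity_odd (x : Int) (hx : pEven x = false) (t : List Int) :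
    t.filter (fun y => pEven (x + y)) = t.filter (fun y => !pEven y) := by
  apply List.filter_congr
  intro y _
  rw [pEven_mod] at hx
  rw [decide_eq_false_iff_not] at hx
  have hx2 : x % 2 = 1 := by omega
  rw [pEven_mod, pEven_mod]
  by_cases hy : y % 2 = 0
  · rw [decide_eq_true hy, decide_eq_false (show ¬ (x + y) % 2 = 0 by omega)]
    rfl
  · rw [decide_eq_false hy, decide_eq_true (show (x + y) % 2 = 0 by omega)]
    rfl

theorem specVal_cons (x : Int) (xs : List Int) :
    specVal (x :: xs)
      = omax ((maxO (xs.filter (fun y => pEven (x + y)))).map (fun m => x + m)) (specVal xs) := by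
  by_cases hx : pEven x
  · have h1 : (x :: xs).filter pEven = x :: xs.filter pEven := by simp [List.filter, hx]
    have h2 : (x :: xs).filter (fun y => !pEven y) = xs.filter (fun y => !pEven y) := by
      simp [List.filter, hx]
    rw [specVal, h1, h2, top2sum, filter_parity_even x hx, specVal, omax_assoc]
  · have hx' : pEven x = false := by simpa using hx
    have h1 : (x :: xs).filter pEven = xs.filter pEven := by simp [List.filter, hx']
    have h2 : (x :: xs).filter (fun y => !pEven y) = x :: xs.filter (fun y => !pEven y) := by
      simp [List.filter, hx']
    rw [specVal, h1, h2, top2sum, filter_parity_odd x hx', specVal, omax_left_comm]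

theorem pairsFoldAux_char (l : List Int) : ∀ b : Int, pairsFoldAux l b = clampF b (specVal l) := by
  induction l with
  | nil => intro b; simp [pairsFoldAux, specVal, top2sum, clampF, omax]
  | cons x xs ih =>
      intro b
      rw [pairsFoldAux, inner_char, ih, clampF_omax, ← specVal_cons]

-- A's index loops equal the structural double fold
theorem outer_aux (l : List Int) : ∀ (n k : Nat) (b : Int), l.length = k + n →
    (PySem.List.pyRange (k : Int) (l.length : Int) 1).foldl (fun evenSum i =>
      (PySem.List.pyRange (i + 1) (l.length : Int) 1).foldl (fun evenSum j =>
        if PySem.Int.mod (PySem.List.pyGetD l i 0 + PySem.List.pyGetD l j 0) 2 == 0 then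
          if evenSum < PySem.List.pyGetD l i 0 + PySem.List.pyGetD l j 0 then
            PySem.List.pyGetD l i 0 + PySem.List.pyGetD l j 0
          else evenSum
        else evenSum) evenSum) b
    = pairsFoldAux (l.drop k) b := by
  intro n
  induction n with
  | zero =>
      intro k b hk
      rw [PySem.List.pyRange_one_eq_nil (by omega), List.drop_of_length_le (by omega)]
      rfl
  | succ m ih =>
      intro k b hk
      have hklt : k < l.length := by omega
      rw [PySem.List.pyRange_one_cons (by exact_mod_cast hklt)]
      rw [List.foldl_cons]
      have hcast : (k : Int) + 1 = ((k + 1 : Nat) : Int) := by push_cast; ring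
      rw [hcast, ih (k + 1) _ (by omega)]
      have hdrop : l.drop k = l[k] :: l.drop (k + 1) := List.drop_eq_getElem_cons hklt
      rw [hdrop, pairsFoldAux]
      congr 1
      rw [PySem.List.foldl_pyRange_pyGetD' l 0
        (fun evenSum y =>
          if PySem.Int.mod (PySem.List.pyGetD l (k : Int) 0 + y) 2 == 0 then
            if evenSum < PySem.List.pyGetD l (k : Int) 0 + y then
              PySem.List.pyGetD l (k : Int) 0 + y
            else evenSum
          else evenSum) b (show (0:Int) ≤ ((k + 1 : Nat) : Int) by positivity)]
      have hget : PySem.List.pyGetD l (k : Int) 0 = l[k] := by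
        rw [PySem.List.pyGetD_natCast]
        exact List.getD_eq_getElem l 0 hklt
      simp only [Int.toNat_natCast, hget]
      rfl

theorem portA_char (l : List Int) : findEvenSum l = clampF (-1) (specVal l) := by
  have := outer_aux l l.length 0 (-1) (by omega)
  simpa [findEvenSum, pairsFoldAux_char] using this

-- ===== B side =====

theorem top2_append (l : List Int) (x : Int) :
    top2 (l ++ [x]) = pushTop2 (top2 l).1 (top2 l).2 x := by
  simp [top2, List.foldl_append]

-- the invariant carried by B's two-largest tracker
def pvInv (l : List Int) (s : Option Int × Option Int) : Prop :=
  s.1 = maxO l ∧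
  (∀ b, s.2 = some b → ∃ a, s.1 = some a ∧ b ≤ a ∧ top2sum l = some (a + b)) ∧
  (s.2 = none → top2sum l = none)

theorem top2_inv (l : List Int) : pvInv l (top2 l) := by
  induction l using List.reverseRecOn with
  | nil =>
      exact ⟨rfl, fun b hb => by simp [top2] at hb, fun _ => rfl⟩
  | append_singleton t x ih =>
      obtain ⟨h1, h2, h3⟩ := ih
      rw [top2_append]
      unfold pvInv
      rw [maxO_append, top2sum_append]
      cases he1 : (top2 t).1 with
      | none =>
          have ht : t = [] := (maxO_eq_none t).mp (h1 ▸ he1)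
          subst ht
          refine ⟨?_, ?_, ?_⟩ <;>
            simp [pushTop2, top2sum, maxO, omax]
      | some e1 =>
          cases he2 : (top2 t).2 with
          | none =>
              have ht2 : top2sum t = none := h3 he2
              by_cases hx : x > e1
              · have hp : pushTop2 (some e1) none x = (some x, some e1) := by
                  simp [pushTop2, hx]
                rw [hp]
                refine ⟨?_, ?_, ?_⟩
                · rw [← h1, he1]; simp [omax]; omega
                · intro b hb
                  simp at hb; subst hb
                  refine ⟨x, rfl, by omega, ?_⟩
                  rw [← h1, he1, ht2]; simp [omax]; omega
                · intro h; simp at h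
              · have hp : pushTop2 (some e1) none x = (some e1, some x) := by
                  simp [pushTop2, hx]
                rw [hp]
                refine ⟨?_, ?_, ?_⟩
                · rw [← h1, he1]; simp [omax]; omega
                · intro b hb
                  simp at hb; subst hb
                  refine ⟨e1, rfl, by omega, ?_⟩
                  rw [← h1, he1, ht2]; simp [omax]
                · intro h; simp at h
          | some e2 =>
              obtain ⟨a, ha, hba, hsum⟩ := h2 e2 he2
              rw [he1] at ha
              injection ha with ha'
              subst ha'
              by_cases hx : x > e1
              · have hp : pushTop2 (some e1) (some e2) x = (some x, some e1) := by
                  simp [pushTop2, hx]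
                rw [hp]
                refine ⟨?_, ?_, ?_⟩
                · rw [← h1, he1]; simp [omax]; omega
                · intro b hb
                  simp at hb; subst hb
                  refine ⟨x, rfl, by omega, ?_⟩
                  rw [← h1, he1, hsum]; simp [omax]; omega
                · intro h; simp at h
              · by_cases hx2 : x > e2
                · have hp : pushTop2 (some e1) (some e2) x = (some e1, some x) := by
                    simp [pushTop2, hx, hx2]
                  rw [hp]
                  refine ⟨?_, ?_, ?_⟩
                  · rw [← h1, he1]; simp [omax]; omega
                  · intro b hb
                    simp at hb; subst hb
                    refine ⟨e1, rfl, by omega, ?_⟩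
                    rw [← h1, he1, hsum]; simp [omax]; omega
                  · intro h; simp at h
                · have hp : pushTop2 (some e1) (some e2) x = (some e1, some e2) := by
                    simp [pushTop2, hx, hx2]
                  rw [hp]
                  refine ⟨?_, ?_, ?_⟩
                  · rw [← h1, he1]; simp [omax]; omega
                  · intro b hb
                    simp at hb; subst hb
                    refine ⟨e1, rfl, by omega, ?_⟩
                    rw [← h1, he1, hsum]; simp [omax]; omega
                  · intro h; simp at h

-- B's main fold runs the tracker on the two parity classes
theorem alt_fold_char (l : List Int) :
    l.foldl (fun s x =>
      if PySem.Int.mod x 2 == 0 then (pushTop2 s.1.1 s.1.2 x, s.2)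
      else (s.1, pushTop2 s.2.1 s.2.2 x))
      ((none, none), (none, none))
    = (top2 (l.filter pEven), top2 (l.filter (fun y => !pEven y))) := by
  induction l using List.reverseRecOn with
  | nil => rfl
  | append_singleton t x ih =>
      rw [List.foldl_append, List.foldl_cons, List.foldl_nil, ih, List.filter_append,
        List.filter_append]
      by_cases hx : pEven x
      · have hc : (PySem.Int.mod x 2 == 0) = true := hx
        rw [show List.filter pEven [x] = [x] by simp [hx],
          show List.filter (fun y => !pEven y) [x] = [] by simp [hx],
          List.append_nil, top2_append]
        try simp only [hc, if_true]
      · have hx' : pEven x = false := by simpa using hx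
        have hc : (PySem.Int.mod x 2 == 0) = false := hx'
        rw [show List.filter pEven [x] = [] by simp [hx'],
          show List.filter (fun y => !pEven y) [x] = [x] by simp [hx'],
          List.append_nil, top2_append]
        try simp only [hc, Bool.false_eq_true, if_false]

theorem clampF_top2 (l : List Int) (b : Int) :
    (match (top2 l).2 with
      | some e2 => max b ((top2 l).1.getD 0 + e2)
      | none => b) = clampF b (top2sum l) := by
  obtain ⟨h1, h2, h3⟩ := top2_inv l
  cases he2 : (top2 l).2 with
  | none => rw [h3 he2]; rfl
  | some e2 =>
      obtain ⟨a, ha, _, hsum⟩ := h2 e2 he2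
      rw [hsum, ha]
      simp [clampF]
      try ring_nf

theorem portB_char (l : List Int) : findEvenSum_alt l = clampF (-1) (specVal l) := by
  rw [findEvenSum_alt, alt_fold_char]
  simp only []
  rw [specVal, ← clampF_omax, ← clampF_top2, ← clampF_top2]

-- ===== VERDICT (by name: the statement is the Claim_ definition above) =====
theorem findEvenSum_spec : Claim_equal_findEvenSum := by
  intro l _
  unfold Spec_findEvenSum
  rw [portA_char, portB_char]
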